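-- pv_equiv track=rewrite | github.com/gametwix/python_base_mai | HW1/hw1.py | count_vendor_drones
-- ===== SOURCE A (Python) =====
-- def count_vendor_drones(drones_names):
--     res = dict()
--     for drone in drones_names:
--         vendor = drone.split()[0].lower()
--         if res.get(vendor) is None:
--             res[vendor] = 1
--         else:
--             res[vendor] += 1
--     return res
-- ===== SOURCE B (Python) =====
-- def count_vendor_drones(drones_names):
--     ks = [d.split()[0].lower() for d in drones_names]
--     res = {}
--     while ks:
--         v = ks[0]
--         rest = [k for k in ks[1:] if k != v]
--         res[v] = len(ks) - len(rest)
--         ks = rest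
--     return res
-- ===== Notes on version B (the rewrite author's own statement) =====
-- stated objective: alternative
-- what changed: Replaces A's single-pass dict accumulation (get-check then insert/increment per element) by a partition loop over the key list: repeatedly take the first vendor key, filter all its duplicates out of the remainder, derive its count from the length drop, emit that entry, and continue on the filtered list; no running counter dictionary is maintained.
import Mathlib
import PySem

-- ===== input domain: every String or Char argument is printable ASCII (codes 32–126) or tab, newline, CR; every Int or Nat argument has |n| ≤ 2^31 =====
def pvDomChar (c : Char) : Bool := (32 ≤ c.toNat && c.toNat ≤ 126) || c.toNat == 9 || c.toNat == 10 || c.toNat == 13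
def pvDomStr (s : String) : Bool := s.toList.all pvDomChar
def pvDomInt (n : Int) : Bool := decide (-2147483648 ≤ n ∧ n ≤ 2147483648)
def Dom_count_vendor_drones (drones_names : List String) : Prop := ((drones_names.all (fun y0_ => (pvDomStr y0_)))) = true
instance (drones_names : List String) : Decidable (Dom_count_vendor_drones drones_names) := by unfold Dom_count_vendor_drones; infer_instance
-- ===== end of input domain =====

-- B replaces A's one-pass dict accumulation by a partition loop (emit the first vendor with its count, continue on the remainder filtered of that vendor); alternative decomposition, same result.


-- ===== PORT A =====
-- 'drone.split()[0]' raises IndexError when split() is empty; the total form pyGetD is used, exact under Pre_.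
def count_vendor_drones (drones_names : List String) : List (String × Int) :=
  (drones_names.foldl
    (fun res drone =>
      let vendor := PySem.Str.lower (PySem.List.pyGetD (PySem.Str.split₀ drone) 0 "")
      match res.get? vendor with
      | none => res.insert vendor 1
      | some n => res.insert vendor (n + 1))
    PySem.Dict.empty).items

-- ===== PORT B =====
-- Source B's partition while-loop: each iteration emits one entry, so the loop is the standard recursion on the shrinking key list.
def pvGoB : List String → List (String × Int)
  | [] => []
  | v :: ks =>
      let rest := ks.filter (fun k => k != v)
      (v, ((ks.length : Int) + 1 - rest.length)) :: pvGoB rest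
  termination_by ks => ks.length
  decreasing_by
    simp only [List.length_cons, Nat.lt_succ_iff]
    simpa using List.length_filter_le _ ks

def count_vendor_drones_alt (drones_names : List String) : List (String × Int) :=
  pvGoB (drones_names.map (fun d => PySem.Str.lower (PySem.List.pyGetD (PySem.Str.split₀ d) 0 "")))

-- ===== PRECONDITION & SPEC =====
-- Pre_ excludes lists containing an empty or whitespace-only string: there drone.split() is empty and A raises IndexError (B raises too).
def Pre_count_vendor_drones (drones_names : List String) : Prop :=
  ∀ s ∈ drones_names, PySem.Str.split₀ s ≠ []
instance (drones_names : List String) : Decidable (Pre_count_vendor_drones drones_names) := by unfold Pre_count_vendor_drones; infer_instance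
def pvWitness_count_vendor_drones : List String := ["DJI Mavic", "dji Air", "Parrot Anafi"]
def Spec_count_vendor_drones (drones_names : List String) (out : List (String × Int)) : Prop := out = count_vendor_drones_alt drones_names
instance (drones_names : List String) (out : List (String × Int)) : Decidable (Spec_count_vendor_drones drones_names out) := by unfold Spec_count_vendor_drones; infer_instance

-- ===== CLAIM =====
def Claim_equal_count_vendor_drones : Prop := ∀ (drones_names : List String), Dom_count_vendor_drones drones_names → Pre_count_vendor_drones drones_names → Spec_count_vendor_drones drones_names (count_vendor_drones drones_names)

-- ===== LEMMAS AND PROOFS =====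

-- A's get?-check-then-insert step is exactly the 'insert (getD + 1)' counting step.
theorem count_step_eq (res : PySem.Dict String Int) (v : String) :
    (match res.get? v with
     | none => res.insert v 1
     | some n => res.insert v (n + 1)) = res.insert v (res.getD v 0 + 1) := by
  cases h : res.get? v with
  | none => simp [PySem.Dict.getD_eq_get?_getD, h]
  | some n => simp [PySem.Dict.getD_eq_get?_getD, h]

-- Updating a set with v already present ignores every v in the update list.
theorem update_filter_ne {v : String} :
    ∀ (ks : List String) (s : PySem.Set String), v ∈ s →
      PySem.Set.update s ks = PySem.Set.update s (ks.filter (fun k => k != v)) := by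
  intro ks
  induction ks with
  | nil => intro s _; rfl
  | cons k ks ih =>
    intro s hv
    by_cases hk : k = v
    · subst hk
      have : PySem.Set.add s k = s := PySem.Set.add_of_mem hv
      simp only [List.filter_cons, bne_self_eq_false, PySem.Set.update, List.foldl_cons, this]
      exact ih s hv
    · have hne : (k != v) = true := bne_iff_ne.mpr hk
      simp only [List.filter_cons, hne, if_pos, PySem.Set.update, List.foldl_cons]
      exact ih (PySem.Set.add s k) ((PySem.Set.mem_add s k _).mpr (Or.inl hv))

-- Updating past a leading element no element of the list equals: the head commutes out.
theorem update_cons_not_mem {v : String} :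
    ∀ (ks : List String) (s : PySem.Set String), v ∉ ks → v ∉ s →
      PySem.Set.update (v :: s) ks = v :: PySem.Set.update s ks := by
  intro ks
  induction ks with
  | nil => intro s _ _; rfl
  | cons k ks ih =>
    intro s hks hs
    have hkv : k ≠ v := fun h => hks (h ▸ List.mem_cons_self)
    have htl : v ∉ ks := fun h => hks (List.mem_cons_of_mem _ h)
    simp only [PySem.Set.update, List.foldl_cons]
    by_cases hc : k ∈ s
    · have h1 : PySem.Set.add (v :: s) k = v :: s :=
        PySem.Set.add_of_mem (List.mem_cons_of_mem _ hc)
      have h2 : PySem.Set.add s k = s := PySem.Set.add_of_mem hc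
      rw [h1, h2]; exact ih s htl hs
    · have hcvs : k ∉ (v :: s) := by
        intro hmem
        rcases List.mem_cons.mp hmem with h | h
        · exact hkv h
        · exact hc h
      have h1 : PySem.Set.add (v :: s) k = v :: (s ++ [k]) := by
        rw [PySem.Set.add_of_not_mem hcvs]; rfl
      have h2 : PySem.Set.add s k = s ++ [k] := PySem.Set.add_of_not_mem hc
      rw [h1, h2]
      exact ih (s ++ [k]) htl (by
        intro hmem
        rcases List.mem_append.mp hmem with h | h
        · exact hs h
        · exact hkv (List.mem_singleton.mp h).symm)

-- dedup of a cons: head first, then dedup of the tail with the head filtered out.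
theorem dedup_cons_filter (v : String) (ks : List String) :
    PySem.List.dedup (v :: ks) = v :: PySem.List.dedup (ks.filter (fun k => k != v)) := by
  have h0 : PySem.List.dedup (v :: ks) = PySem.Set.update [v] ks := by
    rw [PySem.List.dedup_eq_ofList, PySem.Set.ofList_eq_foldl]
    rfl
  rw [h0, update_filter_ne ks [v] (List.mem_singleton.mpr rfl)]
  have hnotmem : v ∉ ks.filter (fun k => k != v) := by
    intro h
    have := List.of_mem_filter h
    simp at this
  rw [show ([v] : PySem.Set String) = v :: ([] : PySem.Set String) from rfl,
      update_cons_not_mem _ _ hnotmem (List.not_mem_nil)]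
  rw [PySem.List.dedup_eq_ofList, PySem.Set.ofList_eq_foldl]
  rfl

-- B's recursion computes dedup-with-counts.
theorem pvGoB_eq : ∀ (n : Nat) (ks : List String), ks.length ≤ n →
    pvGoB ks = (PySem.List.dedup ks).map (fun v => (v, (ks.count v : Int))) := by
  intro n
  induction n with
  | zero =>
    intro ks h
    have : ks = [] := List.eq_nil_of_length_eq_zero (Nat.le_zero.mp h)
    subst this; simp [pvGoB]
  | succ n ih =>
    intro ks h
    match ks with
    | [] => simp [pvGoB]
    | v :: ks =>
      have hrestlen : (ks.filter (fun k => k != v)).length ≤ n :=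
        le_trans (List.length_filter_le _ _) (Nat.succ_le_succ_iff.mp h)
      rw [pvGoB, ih _ hrestlen, dedup_cons_filter]
      simp only [List.map_cons]
      have hhead : ((ks.length : Int) + 1 - ((ks.filter (fun k => k != v)).length : Int)) =
          (((v :: ks).count v : Nat) : Int) := by
        have hsplit : ks.length = (ks.filter (fun k => k != v)).length + ks.count v := by
          have hcp := List.length_eq_countP_add_countP (l := ks) (p := fun k => k != v)
          simp only [List.count, List.countP_eq_length_filter] at hcp ⊢
          rw [hcp]
          congr 2
          apply List.filter_congr
          intro a _
          rw [Bool.eq_iff_iff]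
          simp
        rw [List.count_cons_self]
        simp only [hsplit]
        push_cast
        ring_nf
      rw [hhead]
      congr 1
      apply List.map_congr_left
      intro u hu
      have hu' : u ∈ ks.filter (fun k => k != v) := (PySem.List.mem_dedup _ _).mp hu
      have huv : u ≠ v := by
        have := List.of_mem_filter hu'
        simpa using this
      have hcnt : (ks.filter (fun k => k != v)).count u = (v :: ks).count u := by
        rw [List.count_cons_of_ne (Ne.symm huv), List.count_filter (p := fun k => k != v) (bne_iff_ne.mpr huv)]
      rw [hcnt]

-- ===== VERDICT =====
theorem count_vendor_drones_spec : Claim_equal_count_vendor_drones := by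
  intro l _ _
  unfold Spec_count_vendor_drones count_vendor_drones count_vendor_drones_alt
  have h1 : (l.foldl
      (fun res drone =>
        let vendor := PySem.Str.lower (PySem.List.pyGetD (PySem.Str.split₀ drone) 0 "")
        match res.get? vendor with
        | none => res.insert vendor 1
        | some n => res.insert vendor (n + 1))
      (PySem.Dict.empty : PySem.Dict String Int)) =
      PySem.Dict.counter (l.map (fun d => PySem.Str.lower (PySem.List.pyGetD (PySem.Str.split₀ d) 0 ""))) := by
    rw [← PySem.Dict.foldl_insert_getD_add_one_eq_counter, List.foldl_map]
    congr 1
    funext res drone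
    exact count_step_eq res _
  rw [h1, PySem.Dict.items_counter,
      pvGoB_eq (l.map _).length _ le_rfl]
  simp [PySem.List.dedup_eq_ofList]
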